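-- pv_equiv track=rewrite | github.com/ShuxunoO/Kaleidoscope_art_engine_2D | utils/set_layers_weight.py | redistribute_weights_for_all_noweight_layers
-- ===== SOURCE A (Python) =====
-- def redistribute_weights_for_all_noweight_layers(remaining_sum, remaining_counter, layer_list, layer_info):
--     average_value = remaining_sum // remaining_counter
--     for layer in layer_list:
--         if remaining_counter > 1:
--             layer_info[layer]["weight"] = average_value
--             remaining_sum -= average_value
--             remaining_counter -= 1
--         else:
--             layer_info[layer]["weight"] = remaining_sum
--             temp_checker = layer_info[layer]["weight"]
--     return remaining_sum, remaining_counter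
-- ===== SOURCE B (Python) =====
-- def redistribute_weights_for_all_noweight_layers(remaining_sum, remaining_counter, layer_list, layer_info):
--     average_value = remaining_sum // remaining_counter
--     if_count = max(0, min(len(layer_list), remaining_counter - 1))
--     leftover = remaining_sum - if_count * average_value
--     for i, layer in enumerate(layer_list):
--         layer_info[layer]["weight"] = average_value if i < if_count else leftover
--     return leftover, remaining_counter - if_count
-- ===== Notes on version B (the rewrite author's own statement) =====
-- stated objective: simpler
-- what changed: Replaces the decrementing-counter accumulator loop with a precomputed cutoff if_count = max(0, min(len(layer_list), remaining_counter-1)) and closed-form return values; the single enumerate pass only performs the dict assignments.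
import Mathlib
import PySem

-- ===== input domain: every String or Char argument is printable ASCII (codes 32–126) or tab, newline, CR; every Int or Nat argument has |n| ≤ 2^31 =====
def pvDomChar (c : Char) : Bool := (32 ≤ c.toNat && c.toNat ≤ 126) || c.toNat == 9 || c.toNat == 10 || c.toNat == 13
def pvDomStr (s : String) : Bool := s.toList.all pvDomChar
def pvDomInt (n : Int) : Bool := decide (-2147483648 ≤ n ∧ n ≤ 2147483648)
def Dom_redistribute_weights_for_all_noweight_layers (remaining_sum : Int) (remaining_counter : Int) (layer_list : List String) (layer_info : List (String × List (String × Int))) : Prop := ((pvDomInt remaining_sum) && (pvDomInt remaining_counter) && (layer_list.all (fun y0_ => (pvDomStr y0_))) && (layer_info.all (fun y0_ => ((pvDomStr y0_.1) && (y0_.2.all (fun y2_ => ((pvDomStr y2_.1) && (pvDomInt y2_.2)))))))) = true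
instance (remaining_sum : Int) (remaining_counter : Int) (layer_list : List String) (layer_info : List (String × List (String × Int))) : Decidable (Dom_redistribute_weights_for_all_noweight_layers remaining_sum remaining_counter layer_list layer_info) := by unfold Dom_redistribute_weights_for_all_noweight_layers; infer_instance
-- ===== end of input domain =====

-- B replaces A's decrementing-counter loop with a precomputed cutoff and closed-form return values
-- (objective: simpler). Equivalence is about the RETURN value; both programs also mutate layer_info
-- identically in Python, the ports thread that dict state but discard it.

-- ===== PORT A =====
-- layer_info[layer]["weight"] = v  (first matching key; a missing key is a KeyError, excluded by Pre_)
def pvSetWeight (info : List (String × List (String × Int))) (layer : String) (v : Int) : List (String × List (String × Int)) :=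
  match info with
  | [] => []
  | (k, d) :: rest =>
      if k == layer then (k, (PySem.Dict.insert (PySem.Dict.mk d) "weight" v).items) :: rest
      else (k, d) :: pvSetWeight rest layer v

-- the loop body of A (state = (layer_info, remaining_sum, remaining_counter))
def pvStepA (average_value : Int) (st : List (String × List (String × Int)) × Int × Int) (layer : String) : List (String × List (String × Int)) × Int × Int :=
  if st.2.2 > 1 then (pvSetWeight st.1 layer average_value, st.2.1 - average_value, st.2.2 - 1)
  else (pvSetWeight st.1 layer st.2.1, st.2.1, st.2.2)

def redistribute_weights_for_all_noweight_layers (remaining_sum : Int) (remaining_counter : Int) (layer_list : List String) (layer_info : List (String × List (String × Int))) : Int × Int :=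
  let average_value := PySem.Int.floordiv remaining_sum remaining_counter
  let st := layer_list.foldl (pvStepA average_value) (layer_info, remaining_sum, remaining_counter)
  (st.2.1, st.2.2)

-- ===== PORT B =====
def redistribute_weights_for_all_noweight_layers_alt (remaining_sum : Int) (remaining_counter : Int) (layer_list : List String) (layer_info : List (String × List (String × Int))) : Int × Int :=
  let average_value := PySem.Int.floordiv remaining_sum remaining_counter
  let if_count : Int := max 0 (min (layer_list.length : Int) (remaining_counter - 1))
  let leftover := remaining_sum - if_count * average_value
  let _info := (PySem.List.enumerate layer_list).foldl
    (fun info p => pvSetWeight info p.2 (if p.1 < if_count then average_value else leftover)) layer_info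
  (leftover, remaining_counter - if_count)

-- ===== PRECONDITION & SPEC =====
-- Pre_ excludes exactly the inputs where Python A raises: remaining_counter = 0 (ZeroDivisionError)
-- and a layer of layer_list missing from layer_info (KeyError).
def Pre_redistribute_weights_for_all_noweight_layers (remaining_sum : Int) (remaining_counter : Int) (layer_list : List String) (layer_info : List (String × List (String × Int))) : Prop :=
  remaining_counter ≠ 0 ∧ ∀ l ∈ layer_list, l ∈ layer_info.map Prod.fst
instance (remaining_sum : Int) (remaining_counter : Int) (layer_list : List String) (layer_info : List (String × List (String × Int))) : Decidable (Pre_redistribute_weights_for_all_noweight_layers remaining_sum remaining_counter layer_list layer_info) := by unfold Pre_redistribute_weights_for_all_noweight_layers; infer_instance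

def pvWitness_redistribute_weights_for_all_noweight_layers : Int × Int × List String × (List (String × List (String × Int))) :=
  (10, 3, ["a", "b"], [("a", []), ("b", [])])

def Spec_redistribute_weights_for_all_noweight_layers (remaining_sum : Int) (remaining_counter : Int) (layer_list : List String) (layer_info : List (String × List (String × Int))) (out : Int × Int) : Prop := out = redistribute_weights_for_all_noweight_layers_alt remaining_sum remaining_counter layer_list layer_info
instance (remaining_sum : Int) (remaining_counter : Int) (layer_list : List String) (layer_info : List (String × List (String × Int))) (out : Int × Int) : Decidable (Spec_redistribute_weights_for_all_noweight_layers remaining_sum remaining_counter layer_list layer_info out) := by unfold Spec_redistribute_weights_for_all_noweight_layers; infer_instance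

-- ===== CLAIM (what is proved, stated in full; the proofs are below) =====
def Claim_equal_redistribute_weights_for_all_noweight_layers : Prop := ∀ (remaining_sum : Int) (remaining_counter : Int) (layer_list : List String) (layer_info : List (String × List (String × Int))), Dom_redistribute_weights_for_all_noweight_layers remaining_sum remaining_counter layer_list layer_info → Pre_redistribute_weights_for_all_noweight_layers remaining_sum remaining_counter layer_list layer_info → Spec_redistribute_weights_for_all_noweight_layers remaining_sum remaining_counter layer_list layer_info (redistribute_weights_for_all_noweight_layers remaining_sum remaining_counter layer_list layer_info)

-- ===== LEMMAS AND PROOFS =====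
-- A's loop leaves (sum, counter) at the closed form B computes.
lemma pv_foldA (avg : Int) (ls : List String) (info : List (String × List (String × Int))) (s c : Int) :
    (ls.foldl (pvStepA avg) (info, s, c)).2 =
      (s - max 0 (min (ls.length : Int) (c - 1)) * avg,
       c - max 0 (min (ls.length : Int) (c - 1))) := by
  induction ls generalizing info s c with
  | nil =>
      simp only [List.foldl_nil, List.length_nil, Nat.cast_zero]
      have h : max 0 (min (0 : Int) (c - 1)) = 0 := by omega
      rw [h]; simp
  | cons l t ih =>
      simp only [List.foldl_cons, pvStepA]
      by_cases hc : c > 1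
      · simp only [hc, if_pos]
        rw [ih]
        have hk : max 0 (min ((l :: t).length : Int) (c - 1))
            = max 0 (min ((t.length : Int)) (c - 1 - 1)) + 1 := by
          simp only [List.length_cons]; push_cast; omega
        rw [hk, Prod.mk.injEq]; constructor <;> ring
      · simp only [if_neg hc]
        rw [ih]
        have h1 : max 0 (min ((t.length : Int)) (c - 1)) = 0 := by omega
        have h2 : max 0 (min ((l :: t).length : Int) (c - 1)) = 0 := by
          simp only [List.length_cons]; push_cast; omega
        rw [h1, h2, Prod.mk.injEq]; constructor <;> ring

-- ===== VERDICT (by name: the statement is the Claim_ definition above) =====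
theorem redistribute_weights_for_all_noweight_layers_spec : Claim_equal_redistribute_weights_for_all_noweight_layers := by
  intro s c ll info _ _
  show _ = _
  unfold redistribute_weights_for_all_noweight_layers redistribute_weights_for_all_noweight_layers_alt
  simp only []
  have h := pv_foldA (PySem.Int.floordiv s c) ll info s c
  rw [Prod.ext_iff] at h
  exact Prod.ext h.1 h.2
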